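-- pv_equiv track=rewrite | github.com/jmfveneroso/ner-on-html | keras_test/hmm.py | states_to_idx
-- ===== SOURCE A (Python) =====
-- num_labels = 3
--
-- time_steps = 3
--
-- def states_to_idx(states):
--   if len(states) < time_steps:
--     raise Exception('Wrong states length.')
--
--   acc = 0
--   multiplier = 1
--   for s in reversed(states):
--     acc += int(multiplier) * int(s)
--     multiplier *= num_labels
--   return acc
-- ===== SOURCE B (Python) =====
-- num_labels = 3
--
-- time_steps = 3
--
-- def states_to_idx(states):
--   if len(states) < time_steps:
--     raise Exception('Wrong states length.')
--
--   acc = 0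
--   for s in states:
--     acc = acc * num_labels + int(s)
--   return acc
-- ===== Notes on version B (the rewrite author's own statement) =====
-- stated objective: idiomatic
-- what changed: Replaces the reversed-traversal with an explicit multiplier variable by a forward Horner-scheme accumulation (acc = acc*num_labels + s), dropping the multiplier state.
import Mathlib
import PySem

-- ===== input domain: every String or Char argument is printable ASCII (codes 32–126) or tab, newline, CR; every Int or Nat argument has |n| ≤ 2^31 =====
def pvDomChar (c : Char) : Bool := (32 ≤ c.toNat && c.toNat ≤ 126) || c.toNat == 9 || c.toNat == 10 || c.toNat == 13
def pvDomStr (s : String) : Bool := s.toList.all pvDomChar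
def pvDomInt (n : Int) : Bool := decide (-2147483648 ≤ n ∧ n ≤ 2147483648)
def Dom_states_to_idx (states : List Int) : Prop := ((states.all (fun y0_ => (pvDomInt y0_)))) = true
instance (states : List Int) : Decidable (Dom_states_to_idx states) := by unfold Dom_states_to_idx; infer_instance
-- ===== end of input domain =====

-- B replaces the reversed traversal with multiplier state by a forward Horner accumulation; return value only.

-- ===== PORT A =====
-- acc += int(multiplier) * int(s); multiplier *= num_labels, over reversed(states)
def states_to_idx (states : List Int) : Int :=
  (states.reverse.foldl (fun (st : Int × Int) (s : Int) => (st.1 + st.2 * s, st.2 * 3)) (0, 1)).1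

-- ===== PORT B =====
def states_to_idx_alt (states : List Int) : Int :=
  states.foldl (fun acc s => acc * 3 + s) 0

-- ===== PRECONDITION & SPEC =====
-- A (and B) raise 'Wrong states length.' when len(states) < 3; Pre_ excludes exactly those inputs.
def Pre_states_to_idx (states : List Int) : Prop := 3 ≤ states.length
instance (states : List Int) : Decidable (Pre_states_to_idx states) := by unfold Pre_states_to_idx; infer_instance
def pvWitness_states_to_idx : List Int := [1, 0, 2]
def Spec_states_to_idx (states : List Int) (out : Int) : Prop := out = states_to_idx_alt states
instance (states : List Int) (out : Int) : Decidable (Spec_states_to_idx states out) := by unfold Spec_states_to_idx; infer_instance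

-- ===== CLAIM (what is proved, stated in full; the proofs are below) =====
def Claim_equal_states_to_idx : Prop := ∀ (states : List Int), Dom_states_to_idx states → Pre_states_to_idx states → Spec_states_to_idx states (states_to_idx states)

-- ===== LEMMAS AND PROOFS =====
theorem horner_shift (l : List Int) (a : Int) :
    l.foldl (fun acc s => acc * 3 + s) a = a * 3 ^ l.length + l.foldl (fun acc s => acc * 3 + s) 0 := by
  induction l generalizing a with
  | nil => simp
  | cons s t ih =>
    simp only [List.foldl_cons, List.length_cons]
    rw [ih (a * 3 + s), ih (0 * 3 + s)]
    ring

theorem a_foldr (l : List Int) :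
    l.foldr (fun s (st : Int × Int) => (st.1 + st.2 * s, st.2 * 3)) (0, 1)
      = (l.foldl (fun acc s => acc * 3 + s) 0, 3 ^ l.length) := by
  induction l with
  | nil => simp
  | cons s t ih =>
    simp only [List.foldr_cons, ih, List.foldl_cons, List.length_cons]
    rw [horner_shift t (0 * 3 + s)]
    exact Prod.ext (by ring) (by ring)

-- ===== VERDICT (by name: the statement is the Claim_ definition above) =====
theorem states_to_idx_spec : Claim_equal_states_to_idx := by
  intro states _ _
  unfold Spec_states_to_idx states_to_idx states_to_idx_alt
  rw [List.foldl_reverse]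
  have := a_foldr states
  simp only [this]
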